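-- pv_equiv track=rewrite | github.com/ngcdan/wiki | automation/forgejo_issue_collector.py | _find_section_range
-- ===== SOURCE A (Python) =====
-- from typing import Dict, Iterable, List, Optional, Tuple
--
-- def _find_section_range(md: str, header: str) -> Optional[tuple[int, int]]:
--     """Return (start_idx, end_idx) slice for the whole section, or None."""
--     lines = md.splitlines(keepends=True)
--
--     start_line = None
--     for i, line in enumerate(lines):
--         if line.strip() == header:
--             start_line = i
--             break
--
--     if start_line is None:
--         return None
--
--     end_line = len(lines)
--     for j in range(start_line + 1, len(lines)):
--         if lines[j].startswith("## "):
--             end_line = j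
--             break
--
--     start_idx = sum(len(l) for l in lines[:start_line])
--     end_idx = sum(len(l) for l in lines[:end_line])
--     return start_idx, end_idx
-- ===== SOURCE B (Python) =====
-- from typing import Optional
--
-- def _find_section_range(md: str, header: str) -> Optional[tuple[int, int]]:
--     """Single forward pass with a running character offset."""
--     offset = 0
--     start_idx = None
--     for line in md.splitlines(keepends=True):
--         if start_idx is None:
--             if line.strip() == header:
--                 start_idx = offset
--         elif line.startswith("## "):
--             return (start_idx, offset)
--         offset += len(line)
--     return None if start_idx is None else (start_idx, offset)
-- ===== Notes on version B (the rewrite author's own statement) =====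
-- stated objective: simpler
-- what changed: Replaced the two index-search loops plus two prefix-sum comprehensions with one forward pass that carries a running character offset and records start/end offsets directly.
import Mathlib
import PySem

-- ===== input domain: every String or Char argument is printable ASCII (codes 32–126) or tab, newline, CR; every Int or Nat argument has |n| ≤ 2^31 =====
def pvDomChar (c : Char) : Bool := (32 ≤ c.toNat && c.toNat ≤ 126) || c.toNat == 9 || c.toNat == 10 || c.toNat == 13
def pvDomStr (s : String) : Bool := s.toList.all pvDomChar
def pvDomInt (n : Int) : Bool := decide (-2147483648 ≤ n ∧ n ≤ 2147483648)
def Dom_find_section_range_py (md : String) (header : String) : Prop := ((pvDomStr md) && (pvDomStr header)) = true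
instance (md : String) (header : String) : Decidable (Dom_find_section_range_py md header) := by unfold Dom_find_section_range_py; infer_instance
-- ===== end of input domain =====

-- B is a single forward pass with a running character offset instead of A's two
-- index-search loops plus two prefix-sum comprehensions (objective: simpler).

-- shared helper: md.splitlines(keepends=True), exact on '\n' / '\r' / '\r\n'
-- (the only line breaks present in the stated printable-ASCII+tab/CR/LF domain)
def slGo : List Char → List Char → List (List Char)
  | [], acc => if acc = [] then [] else [acc.reverse]
  | '\r' :: '\n' :: rest, acc => (acc.reverse ++ ['\r', '\n']) :: slGo rest []
  | '\n' :: rest, acc => (acc.reverse ++ ['\n']) :: slGo rest []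
  | '\r' :: rest, acc => (acc.reverse ++ ['\r']) :: slGo rest []
  | c :: rest, acc => slGo rest (c :: acc)

def splitlinesKeep (cs : List Char) : List (List Char) := slGo cs []

-- ===== PORT A =====
-- first loop of A: index of the first line with line.strip() == header
def aStart : List (List Char) → List Char → Option Nat
  | [], _ => none
  | l :: rest, hdr =>
    if PySem.Chars.strip l == hdr then some 0 else (aStart rest hdr).map (· + 1)

-- second loop of A over the suffix after start_line: offset of the first
-- line starting with "## ", or the suffix length if none (= end_line default len(lines))
def aEnd : List (List Char) → Nat
  | [] => 0
  | l :: rest => if PySem.Chars.startswith l ['#', '#', ' '] then 0 else aEnd rest + 1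

-- sum(len(l) for l in ls)
def sumLen (ls : List (List Char)) : Int := (ls.map (fun l => (l.length : Int))).sum

def find_section_range_py (md : String) (header : String) : Option (Int × Int) :=
  match aStart (splitlinesKeep md.toList) header.toList with
  | none => none
  | some s =>
    some (sumLen ((splitlinesKeep md.toList).take s),
          sumLen ((splitlinesKeep md.toList).take
            (s + 1 + aEnd ((splitlinesKeep md.toList).drop (s + 1)))))

-- ===== PORT B =====
def bGo : List (List Char) → List Char → Int → Option Int → Option (Int × Int)
  | [], _, off, st =>
    match st with
    | none => none
    | some s => some (s, off)
  | l :: rest, hdr, off, st =>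
    match st with
    | none =>
      bGo rest hdr (off + l.length)
        (if PySem.Chars.strip l == hdr then some off else none)
    | some s =>
      if PySem.Chars.startswith l ['#', '#', ' '] then some (s, off)
      else bGo rest hdr (off + l.length) (some s)

def find_section_range_py_alt (md : String) (header : String) : Option (Int × Int) :=
  bGo (splitlinesKeep md.toList) header.toList 0 none

-- ===== PRECONDITION & SPEC =====
def Spec_find_section_range_py (md : String) (header : String) (out : Option (Int × Int)) : Prop := out = find_section_range_py_alt md header
instance (md : String) (header : String) (out : Option (Int × Int)) : Decidable (Spec_find_section_range_py md header out) := by unfold Spec_find_section_range_py; infer_instance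

-- ===== CLAIM (what is proved, stated in full; the proofs are below) =====
def Claim_equal_find_section_range_py : Prop := ∀ (md : String) (header : String), Dom_find_section_range_py md header → Spec_find_section_range_py md header (find_section_range_py md header)

-- ===== LEMMAS AND PROOFS =====

lemma sumLen_cons (l : List Char) (ls : List (List Char)) :
    sumLen (l :: ls) = l.length + sumLen ls := by
  simp [sumLen]

-- phase 2: once the start offset is fixed, B scans for "## " accumulating offset
lemma bGo_post (lines : List (List Char)) (hdr : List Char) (off s : Int) :
    bGo lines hdr off (some s) = some (s, off + sumLen (lines.take (aEnd lines))) := by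
  induction lines generalizing off with
  | nil => simp [bGo, sumLen]
  | cons l rest ih =>
    by_cases h : PySem.Chars.startswith l ['#', '#', ' ']
    · simp [bGo, aEnd, h, sumLen]
    · have ha : aEnd (l :: rest) = aEnd rest + 1 := by simp [aEnd, h]
      simp only [bGo, h, Bool.false_eq_true, if_false, ih, ha, List.take_succ_cons, sumLen_cons]
      congr 2
      ring

-- phase 1: before the start line is found
lemma bGo_pre (lines : List (List Char)) (hdr : List Char) (off : Int) :
    bGo lines hdr off none =
      (aStart lines hdr).map (fun s =>
        (off + sumLen (lines.take s),
         off + sumLen (lines.take (s + 1 + aEnd (lines.drop (s + 1)))))) := by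
  induction lines generalizing off with
  | nil => simp [bGo, aStart]
  | cons l rest ih =>
    by_cases h : PySem.Chars.strip l == hdr
    · simp only [bGo, aStart, h, if_true, bGo_post, Option.map_some]
      congr 2
      · simp [sumLen]
      · have : (0:Nat) + 1 + aEnd (List.drop (0 + 1) (l :: rest)) = aEnd rest + 1 := by
          simp [List.drop_succ_cons]; omega
        rw [this, List.take_succ_cons, sumLen_cons]; ring
    · simp only [bGo, aStart, h, Bool.false_eq_true, if_false, ih]
      cases hs : aStart rest hdr with
      | none => simp
      | some s =>
        simp only [Option.map_some]
        congr 2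
        · simp [List.take_succ_cons, sumLen_cons]; ring
        · have h1 : s + 1 + 1 + aEnd (List.drop (s + 1 + 1) (l :: rest))
              = (s + 1 + aEnd (List.drop (s + 1) rest)) + 1 := by
            simp [List.drop_succ_cons]; omega
          rw [h1, List.take_succ_cons, sumLen_cons]
          ring

-- ===== VERDICT (by name: the statement is the Claim_ definition above) =====
theorem find_section_range_py_spec : Claim_equal_find_section_range_py := by
  intro md header _
  unfold Spec_find_section_range_py find_section_range_py find_section_range_py_alt
  rw [bGo_pre]
  cases hs : aStart (splitlinesKeep md.toList) header.toList with
  | none => simp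
  | some s => simp
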